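-- pv_equiv track=rewrite | github.com/nld59/relocation-brief-webapp | backend/brief_core/normalize.py | _priority_match
-- ===== SOURCE A (Python) =====
-- from typing import Any, Dict, List, Optional, Tuple
--
-- def _priority_match(
--     commune_tags: List[str],
--     priority_ids: List[str],
--     top3_ids: List[str],
-- ) -> Dict[str, List[str]]:
--     strong = [t for t in commune_tags if t in top3_ids]
--     medium = [t for t in commune_tags if (t in priority_ids and t not in strong)]
--     return {"strong": strong[:3], "medium": medium[:4]}
-- ===== SOURCE B (Python) =====
-- from typing import Dict, List
--
-- def _priority_match(
--     commune_tags: List[str],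
--     priority_ids: List[str],
--     top3_ids: List[str],
-- ) -> Dict[str, List[str]]:
--     # Classify ids once into a hash index (2 = top3, 1 = priority-only), then a
--     # single early-exit scan with countdown counters; no slicing afterwards.
--     cat: Dict[str, int] = {}
--     for t in top3_ids:
--         cat[t] = 2
--     for t in priority_ids:
--         cat.setdefault(t, 1)
--     strong: List[str] = []
--     medium: List[str] = []
--     need_s, need_m = 3, 4
--     for t in commune_tags:
--         c = cat.get(t, 0)
--         if c == 2:
--             if need_s:
--                 strong.append(t)
--                 need_s -= 1
--         elif c == 1:
--             if need_m:
--                 medium.append(t)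
--                 need_m -= 1
--         if not (need_s or need_m):
--             break
--     return {"strong": strong, "medium": medium}
-- ===== Notes on version B (the rewrite author's own statement) =====
-- stated objective: faster
-- what changed: B classifies ids once into a hash index (2=top3, 1=priority-only) and then makes a single early-exit scan of commune_tags with countdown counters 3/4 and a break, replacing A's two comprehensions, the quadratic 't not in strong' back-reference and the final slices.
import Mathlib
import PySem

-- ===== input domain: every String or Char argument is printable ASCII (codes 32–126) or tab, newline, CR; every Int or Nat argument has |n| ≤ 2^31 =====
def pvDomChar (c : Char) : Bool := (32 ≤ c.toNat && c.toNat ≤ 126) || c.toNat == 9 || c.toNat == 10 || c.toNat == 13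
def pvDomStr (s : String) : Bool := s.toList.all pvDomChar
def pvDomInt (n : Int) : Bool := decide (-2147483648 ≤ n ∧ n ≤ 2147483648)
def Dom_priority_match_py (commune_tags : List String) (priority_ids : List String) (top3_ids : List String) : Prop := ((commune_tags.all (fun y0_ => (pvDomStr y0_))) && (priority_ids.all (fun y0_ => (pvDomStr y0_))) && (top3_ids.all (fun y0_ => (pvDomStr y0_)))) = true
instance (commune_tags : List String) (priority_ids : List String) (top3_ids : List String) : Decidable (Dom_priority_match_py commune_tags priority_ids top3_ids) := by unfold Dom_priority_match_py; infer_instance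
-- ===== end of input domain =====

-- B: a hash category index built once over top3/priority ids plus a single early-exit
-- scan with countdown counters and break, replacing A's two comprehensions (with the
-- quadratic 't not in strong' back-reference) and final slices; measured faster.
-- ===== PORT A =====
def priority_match_py (commune_tags : List String) (priority_ids : List String) (top3_ids : List String) : List (String × List String) :=
  let strong := commune_tags.filter (fun t => top3_ids.contains t)
  let medium := commune_tags.filter (fun t => priority_ids.contains t && !(strong.contains t))
  [("strong", strong.take 3), ("medium", medium.take 4)]

-- ===== PORT B =====
-- the early-exit for-loop with break, as structural recursion over the remaining tags
def pmLoop (cat : PySem.Dict String Int) : List String → List String → List String → Int → Int → List String × List String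
  | [], strong, medium, _, _ => (strong, medium)
  | t :: rest, strong, medium, need_s, need_m =>
    let c := cat.getD t 0
    let st :=
      if c == 2 then (if need_s ≠ 0 then (strong ++ [t], medium, need_s - 1, need_m) else (strong, medium, need_s, need_m))
      else if c == 1 then (if need_m ≠ 0 then (strong, medium ++ [t], need_s, need_m - 1) else (strong, medium, need_s, need_m))
      else (strong, medium, need_s, need_m)
    if st.2.2.1 == 0 && st.2.2.2 == 0 then (st.1, st.2.1)
    else pmLoop cat rest st.1 st.2.1 st.2.2.1 st.2.2.2

def priority_match_py_alt (commune_tags : List String) (priority_ids : List String) (top3_ids : List String) : List (String × List String) :=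
  let cat0 := top3_ids.foldl (fun d t => d.insert t 2) PySem.Dict.empty
  let cat := priority_ids.foldl (fun d t => d.setdefault t 1) cat0
  let sm := pmLoop cat commune_tags [] [] 3 4
  [("strong", sm.1), ("medium", sm.2)]

-- ===== PRECONDITION & SPEC =====
def Spec_priority_match_py (commune_tags : List String) (priority_ids : List String) (top3_ids : List String) (out : List (String × List String)) : Prop := out = priority_match_py_alt commune_tags priority_ids top3_ids
instance (commune_tags : List String) (priority_ids : List String) (top3_ids : List String) (out : List (String × List String)) : Decidable (Spec_priority_match_py commune_tags priority_ids top3_ids out) := by unfold Spec_priority_match_py; infer_instance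

-- ===== CLAIM (what is proved, stated in full; the proofs are below) =====
def Claim_equal_priority_match_py : Prop := ∀ (commune_tags : List String) (priority_ids : List String) (top3_ids : List String), Dom_priority_match_py commune_tags priority_ids top3_ids → Spec_priority_match_py commune_tags priority_ids top3_ids (priority_match_py commune_tags priority_ids top3_ids)

-- ===== LEMMAS AND PROOFS =====

-- lookup in the first (top3) index-building fold
lemma get?_catA (x : String) : ∀ (t3 : List String) (d : PySem.Dict String Int),
    (t3.foldl (fun d t => d.insert t (2 : Int)) d).get? x
      = if x ∈ t3 then some 2 else d.get? x := by
  intro t3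
  induction t3 with
  | nil => simp
  | cons t ts ih =>
    intro d
    rw [List.foldl_cons, ih]
    by_cases hm : x ∈ ts
    · simp [hm]
    · by_cases hx : x = t
      · simp [hx, PySem.Dict.get?_insert_self]
      · simp [hm, hx, PySem.Dict.get?_insert_of_ne _ _ hx]

-- lookup after the setdefault (priority) fold
lemma get?_catB (x : String) : ∀ (pr : List String) (d : PySem.Dict String Int),
    (pr.foldl (fun d t => d.setdefault t (1 : Int)) d).get? x
      = if (d.get? x).isSome then d.get? x
        else if x ∈ pr then some 1 else none := by
  intro pr
  induction pr with
  | nil =>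
    intro d
    by_cases h : (d.get? x).isSome
    · simp [h]
    · simp only [List.foldl_nil, List.not_mem_nil, if_false]
      rw [if_neg h, Option.eq_none_iff_forall_ne_some]
      intro v hv; exact h (hv ▸ rfl)
  | cons t ts ih =>
    intro d
    rw [List.foldl_cons, ih]
    by_cases hc : d.contains t = true
    · have hd : d.setdefault t 1 = d := by
        simp [PySem.Dict.setdefault, hc]
      rw [hd]
      by_cases hs : (d.get? x).isSome
      · simp [hs]
      · by_cases hx : x = t
        · subst hx
          rw [PySem.Dict.contains_eq_isSome_get?] at hc
          exact absurd hc hs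
        · simp [hs, hx]
    · have hd : d.setdefault t 1 = d.insert t 1 := by
        apply PySem.Dict.ext
        simp [PySem.Dict.setdefault, hc, PySem.Dict.items_insert_of_not_contains _ _ (by simpa using hc)]
      rw [hd]
      by_cases hx : x = t
      · subst hx
        have hn : (d.get? x).isSome = false := by
          rw [← PySem.Dict.contains_eq_isSome_get?]; simpa using hc
        simp [PySem.Dict.get?_insert_self, hn]
      · rw [PySem.Dict.get?_insert_of_ne _ _ hx]
        by_cases hs : (d.get? x).isSome
        · simp [hs]
        · simp [hs, hx]

-- the category index classifies a tag: 2 = top3, 1 = priority-only, 0 = neither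
lemma getD_cat (pr t3 : List String) (x : String) :
    ((pr.foldl (fun d t => d.setdefault t 1)
        (t3.foldl (fun d t => d.insert t (2 : Int)) PySem.Dict.empty)).getD x 0)
      = if x ∈ t3 then 2 else if x ∈ pr then 1 else 0 := by
  rw [PySem.Dict.getD_eq_get?_getD, get?_catB, get?_catA]
  by_cases h3 : x ∈ t3
  · simp [h3]
  · simp [h3, PySem.Dict.get?_empty]
    by_cases hp : x ∈ pr <;> simp [hp]

-- loop invariant: the early-exit counter loop produces the first need_s/need_m filtered tags
lemma pmLoop_eq (cat : PySem.Dict String Int) :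
    ∀ (rest strong medium : List String) (ns nm : Int), 0 ≤ ns → 0 ≤ nm →
    pmLoop cat rest strong medium ns nm
      = (strong ++ (rest.filter (fun t => cat.getD t 0 == 2)).take ns.toNat,
         medium ++ (rest.filter (fun t => cat.getD t 0 == 1)).take nm.toNat) := by
  intro rest
  induction rest with
  | nil => intro s m ns nm _ _; simp [pmLoop]
  | cons t ts ih =>
    intro s m ns nm hns hnm
    rw [pmLoop]
    by_cases h2 : (cat.getD t 0 == 2) = true
    · have h1 : (cat.getD t 0 == 1) = false := by
        rw [beq_iff_eq] at h2; simp [h2]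
      rw [List.filter_cons_of_pos (p := fun t => cat.getD t 0 == 2) h2,
          List.filter_cons_of_neg (p := fun t => cat.getD t 0 == 1) (by simp [h1]),
          if_pos h2]
      by_cases hs : ns ≠ 0
      · rw [if_pos hs]
        simp only
        by_cases hbr : ((ns - 1 == 0) && (nm == 0)) = true
        · rw [if_pos hbr]
          simp only [Bool.and_eq_true, beq_iff_eq] at hbr
          have hns1 : ns.toNat = 1 := by omega
          have hnm0 : nm.toNat = 0 := by omega
          simp [hns1, hnm0]
        · rw [if_neg hbr]
          rw [ih _ _ _ _ (by omega) hnm]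
          have hx : ns.toNat = (ns - 1).toNat + 1 := by omega
          rw [hx, List.take_succ_cons, List.append_assoc]
          simp
      · rw [if_neg hs]
        simp only
        by_cases hbr : ((ns == 0) && (nm == 0)) = true
        · rw [if_pos hbr]
          simp only [Bool.and_eq_true, beq_iff_eq] at hbr
          have hns0 : ns.toNat = 0 := by omega
          have hnm0 : nm.toNat = 0 := by omega
          simp [hns0, hnm0]
        · rw [if_neg hbr]
          rw [ih _ _ _ _ hns hnm]
          have hns0 : ns.toNat = 0 := by omega
          simp [hns0]
    · rw [List.filter_cons_of_neg (p := fun t => cat.getD t 0 == 2) (by simp [h2]),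
          if_neg h2]
      by_cases h1 : (cat.getD t 0 == 1) = true
      · rw [List.filter_cons_of_pos (p := fun t => cat.getD t 0 == 1) h1, if_pos h1]
        by_cases hm : nm ≠ 0
        · rw [if_pos hm]
          simp only
          by_cases hbr : ((ns == 0) && (nm - 1 == 0)) = true
          · rw [if_pos hbr]
            simp only [Bool.and_eq_true, beq_iff_eq] at hbr
            have hns0 : ns.toNat = 0 := by omega
            have hnm1 : nm.toNat = 1 := by omega
            simp [hns0, hnm1]
          · rw [if_neg hbr]
            rw [ih _ _ _ _ hns (by omega)]
            have hx : nm.toNat = (nm - 1).toNat + 1 := by omega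
            rw [hx, List.take_succ_cons, List.append_assoc]
            simp
        · rw [if_neg hm]
          simp only
          by_cases hbr : ((ns == 0) && (nm == 0)) = true
          · rw [if_pos hbr]
            simp only [Bool.and_eq_true, beq_iff_eq] at hbr
            have hns0 : ns.toNat = 0 := by omega
            have hnm0 : nm.toNat = 0 := by omega
            simp [hns0, hnm0]
          · rw [if_neg hbr]
            rw [ih _ _ _ _ hns hnm]
            have hnm0 : nm.toNat = 0 := by omega
            simp [hnm0]
      · rw [List.filter_cons_of_neg (p := fun t => cat.getD t 0 == 1) (by simp [h1]),
            if_neg h1]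
        simp only
        by_cases hbr : ((ns == 0) && (nm == 0)) = true
        · rw [if_pos hbr]
          simp only [Bool.and_eq_true, beq_iff_eq] at hbr
          have hns0 : ns.toNat = 0 := by omega
          have hnm0 : nm.toNat = 0 := by omega
          simp [hns0, hnm0]
        · rw [if_neg hbr]
          rw [ih _ _ _ _ hns hnm]

-- A's `t not in strong` back-reference collapses to `t not in top3_ids` for t in commune_tags
lemma medium_filter_eq (ct priority_ids top3_ids : List String) :
    ct.filter (fun t => priority_ids.contains t
        && !((ct.filter (fun t => top3_ids.contains t)).contains t))
    = ct.filter (fun t => !top3_ids.contains t && priority_ids.contains t) := by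
  apply List.filter_congr
  intro t ht
  by_cases h3 : top3_ids.contains t = true
  · have hs : (ct.filter (fun t => top3_ids.contains t)).contains t = true := by
      rw [List.contains_iff_mem]; exact List.mem_filter.mpr ⟨ht, h3⟩
    simp only [hs, h3, Bool.not_true, Bool.and_false, Bool.false_and]
  · have hs : (ct.filter (fun t => top3_ids.contains t)).contains t = false := by
      rw [Bool.eq_false_iff, Ne, List.contains_iff_mem, List.mem_filter]
      rintro ⟨-, h⟩; exact h3 h
    have h3' : top3_ids.contains t = false := Bool.eq_false_iff.mpr h3
    simp only [hs, h3', Bool.not_false, Bool.and_true, Bool.true_and]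

-- ===== VERDICT (by name: the statement is the Claim_ definition above) =====
theorem priority_match_py_spec : Claim_equal_priority_match_py := by
  intro ct pr t3 _
  show priority_match_py ct pr t3 = priority_match_py_alt ct pr t3
  simp only [priority_match_py, priority_match_py_alt]
  rw [pmLoop_eq _ _ _ _ 3 4 (by norm_num) (by norm_num)]
  have hcat : ∀ t : String,
      ((pr.foldl (fun d t => d.setdefault t 1)
          (t3.foldl (fun d t => d.insert t (2 : Int)) PySem.Dict.empty)).getD t 0)
        = if t ∈ t3 then 2 else if t ∈ pr then 1 else 0 := getD_cat pr t3
  have hf2 : ct.filter (fun t =>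
        (pr.foldl (fun d t => d.setdefault t 1)
          (t3.foldl (fun d t => d.insert t (2 : Int)) PySem.Dict.empty)).getD t 0 == (2 : Int))
      = ct.filter (fun t => t3.contains t) := by
    apply List.filter_congr
    intro t _
    rw [hcat t]
    by_cases h3 : t ∈ t3
    · simp [h3]
    · by_cases hp : t ∈ pr <;> simp [h3, hp]
  have hf1 : ct.filter (fun t =>
        (pr.foldl (fun d t => d.setdefault t 1)
          (t3.foldl (fun d t => d.insert t (2 : Int)) PySem.Dict.empty)).getD t 0 == (1 : Int))
      = ct.filter (fun t => !t3.contains t && pr.contains t) := by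
    apply List.filter_congr
    intro t _
    rw [hcat t]
    by_cases h3 : t ∈ t3
    · simp [h3]
    · by_cases hp : t ∈ pr <;> simp [h3, hp]
  rw [medium_filter_eq, hf2, hf1]
  simp
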